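-- pv_equiv track=rewrite | github.com/smrithikrish/Superset | Superset console app.py | makeSuperSetDeck
-- ===== SOURCE A (Python) =====
-- import random, itertools, string, copy
--
-- def stringProduct(L):
--     # This helper function (which is extremely useful for makeSuperSetDeck)
--     # is provided for students, since it uses some concepts we have not
--     # yet covered.  This takes a list of strings and returns a list of
--     # their product -- that is, a list of strings where the first character
--     # is any letter from the first string, the second character is the any
--     # letter from the second string, and so on.
--     # For example:
--     # stringProduct(['AB', 'CDE']) returns ['AC', 'AD', 'AE', 'BC', 'BD', 'BE']
--     # Also:
--     # stringProduct(['AB', 'CD', 'EFG']) returns ['ACE', 'ACF', 'ACG', 'ADE',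
--     #                                             'ADF', 'ADG', 'BCE', 'BCF',
--     #                                             'BCG', 'BDE', 'BDF', 'BDG']
--     resultTuples = list(itertools.product(*L))
--     resultStrings = [''.join(t) for t in resultTuples]
--     return resultStrings
--
-- def makeSuperSetDeck(dims):
--     # This generates all possible cards with the given dimensions
--     # and returns them in a sorted list.
--     # For example, consider makeSuperSetDeck([3,4]):
--     # Here, there are two features:
--     #     * feature0 has 3 features ('A', 'B', or 'C')
--     #     * feature1 has 4 features ('A', 'B', 'C', or 'D')
--     # Each card in the deck includes an option from each feature,
--     # resulting in this deck:
--     # ['AA', 'AB', 'AC', 'AD', 'BA', 'BB', 'BC', 'BD', 'CA', 'CB', 'CC', 'CD']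
--     # Thus, makeSuperSetDeck([3,4]) returns that list.
--     # Hint: use stringProduct() here!
--     letters = ["A", "B", "C", "D", "E"]
--     temp = ""
--     features = []
--     for i in range(len(dims)):
--         for j in range(dims[i]):
--             temp += letters[j]
--         features.append(temp)
--         temp = ""
--     resultStrings = stringProduct(features)
--     return resultStrings
-- ===== SOURCE B (Python) =====
-- def makeSuperSetDeck(dims):
--     # Mixed-radix unranking: the deck is enumerated by card number, and each
--     # card is decoded arithmetically from its rank (no cartesian product built).
--     letters = "ABCDE"
--     radices = [max(d, 0) for d in dims]
--
--     def size(rs):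
--         t = 1
--         for r in rs:
--             t *= r
--         return t
--
--     def decode(rs, n):
--         if not rs:
--             return ""
--         t = size(rs[1:])
--         return letters[n // t] + decode(rs[1:], n % t)
--
--     return [decode(radices, n) for n in range(size(radices))]
-- ===== Notes on version B (the rewrite author's own statement) =====
-- stated objective: alternative
-- what changed: Replaces the feature-string building plus itertools.product/join with mixed-radix unranking: each card is decoded arithmetically (div/mod by suffix products of the radices) from its rank in range(product of dims).
import Mathlib
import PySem

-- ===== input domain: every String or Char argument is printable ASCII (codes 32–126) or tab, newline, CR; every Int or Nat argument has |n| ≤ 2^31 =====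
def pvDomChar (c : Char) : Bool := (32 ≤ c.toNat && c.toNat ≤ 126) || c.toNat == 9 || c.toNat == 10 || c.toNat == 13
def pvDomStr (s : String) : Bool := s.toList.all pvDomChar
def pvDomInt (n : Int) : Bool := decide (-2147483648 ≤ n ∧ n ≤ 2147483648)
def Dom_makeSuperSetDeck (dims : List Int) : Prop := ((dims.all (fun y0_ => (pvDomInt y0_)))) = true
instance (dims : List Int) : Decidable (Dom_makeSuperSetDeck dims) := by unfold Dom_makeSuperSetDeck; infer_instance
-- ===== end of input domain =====

-- B replaces A's feature-string building + itertools.product/join by mixed-radix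
-- unranking: each card is decoded arithmetically from its rank (objective: alternative).
-- Return value only; no mutation.

-- ===== PORT A =====
-- itertools.product(*L) over strings-as-char-lists (first factor varies slowest)
def pyProductA : List (List Char) → List (List Char)
  | [] => [[]]
  | f :: rest => f.flatMap (fun c => (pyProductA rest).map (fun t => c :: t))

-- stringProduct(L): list(itertools.product(*L)) then ''.join each tuple
def stringProductA (L : List (List Char)) : List String :=
  (pyProductA L).map (fun t => String.ofList t)

def makeSuperSetDeck (dims : List Int) : List String :=
  let letters : List (List Char) := [['A'], ['B'], ['C'], ['D'], ['E']]
  let features : List (List Char) :=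
    (PySem.List.pyRange 0 dims.length 1).foldl
      (fun feats i =>
        feats ++ [(PySem.List.pyRange 0 (PySem.List.pyGetD dims i 0) 1).foldl
          (fun temp j => temp ++ PySem.List.pyGetD letters j []) []]) []
  stringProductA features

-- ===== PORT B =====
-- size(rs): running product of the radices
def sizeB (rs : List Int) : Int := rs.foldl (fun t r => t * r) 1

-- decode(rs, n): peel the most-significant digit; string concatenation is ported as
-- cons on the char list (letters[n // t], exact inside Pre_ where the index is in range)
def decodeB : List Int → Int → List Char
  | [], _ => []
  | _ :: rs, n =>
    PySem.List.pyGetD ['A', 'B', 'C', 'D', 'E'] (PySem.Int.floordiv n (sizeB rs)) 'A'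
      :: decodeB rs (PySem.Int.mod n (sizeB rs))

def makeSuperSetDeck_alt (dims : List Int) : List String :=
  let radices := dims.map (fun d => max d 0)
  (PySem.List.pyRange 0 (sizeB radices) 1).map (fun n => String.ofList (decodeB radices n))

-- ===== PRECONDITION & SPEC =====
-- A raises IndexError (letters[j]) exactly when some dimension is ≥ 6; those inputs are excluded.
def Pre_makeSuperSetDeck (dims : List Int) : Prop := ∀ d ∈ dims, d ≤ 5
instance (dims : List Int) : Decidable (Pre_makeSuperSetDeck dims) := by unfold Pre_makeSuperSetDeck; infer_instance
def pvWitness_makeSuperSetDeck : List Int := [3, 4]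

def Spec_makeSuperSetDeck (dims : List Int) (out : List String) : Prop := out = makeSuperSetDeck_alt dims
instance (dims : List Int) (out : List String) : Decidable (Spec_makeSuperSetDeck dims out) := by unfold Spec_makeSuperSetDeck; infer_instance

-- ===== CLAIM (what is proved, stated in full; the proofs are below) =====
def Claim_equal_makeSuperSetDeck : Prop := ∀ (dims : List Int), Dom_makeSuperSetDeck dims → Pre_makeSuperSetDeck dims → Spec_makeSuperSetDeck dims (makeSuperSetDeck dims)

-- ===== LEMMAS AND PROOFS =====

-- A's inner loop over range(d) builds exactly the first (max d 0) letters, when d ≤ 5.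
lemma featA_eq (d : Int) (hd : d ≤ 5) :
    (PySem.List.pyRange 0 d 1).foldl
      (fun temp j => temp ++ PySem.List.pyGetD [['A'], ['B'], ['C'], ['D'], ['E']] j []) [] =
    List.take (max d 0).toNat ['A', 'B', 'C', 'D', 'E'] := by
  by_cases h0 : d ≤ 0
  · rw [PySem.List.pyRange_one_eq_nil h0]
    have : (max d 0).toNat = 0 := by omega
    simp [this]
  · interval_cases d <;> decide

lemma sizeB_go (a : Int) (rs : List Int) :
    rs.foldl (fun t r => t * r) a = a * rs.foldl (fun t r => t * r) 1 := by
  induction rs generalizing a with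
  | nil => simp
  | cons r rs ih =>
    simp only [List.foldl_cons]
    rw [ih (a * r), ih (1 * r)]
    ring

lemma sizeB_cons (r : Int) (rs : List Int) : sizeB (r :: rs) = r * sizeB rs := by
  unfold sizeB
  simp only [List.foldl_cons]
  rw [sizeB_go (1 * r)]
  ring

lemma sizeB_nonneg (rs : List Int) (h : ∀ r ∈ rs, 0 ≤ r) : 0 ≤ sizeB rs := by
  induction rs with
  | nil => simp [sizeB]
  | cons r rs ih =>
    rw [sizeB_cons]
    have h1 := h r (by simp)
    have h2 := ih (fun x hx => h x (by simp [hx]))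
    positivity

-- enumerate a product range by (quotient, remainder)
lemma range_mul_flatMap {α : Type} (a b : ℕ) (f : ℕ → α) :
    (List.range (a * b)).map f =
    (List.range a).flatMap (fun q => (List.range b).map (fun m => f (q * b + m))) := by
  induction a with
  | zero => simp
  | succ a ih =>
    have : (a + 1) * b = a * b + b := by ring
    rw [this, List.range_add, List.range_succ]
    simp only [List.map_append, List.flatMap_append, ih, List.map_map]
    simp [Function.comp_def, List.flatMap_cons]

lemma take_letters (a : ℕ) (ha : a ≤ 5) :
    List.take a ['A', 'B', 'C', 'D', 'E'] =
    (List.range a).map (fun q : ℕ => PySem.List.pyGetD ['A', 'B', 'C', 'D', 'E'] ((q : ℕ) : Int) 'A') := by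
  interval_cases a <;> decide

lemma decode_step (r : Int) (rs : List Int) (hT : 0 ≤ sizeB rs) (q m : ℕ)
    (hm : m < (sizeB rs).toNat) :
    decodeB (r :: rs) ((q * (sizeB rs).toNat + m : ℕ) : Int) =
    PySem.List.pyGetD ['A', 'B', 'C', 'D', 'E'] (q : Int) 'A' :: decodeB rs (m : Int) := by
  have hb : sizeB rs = (((sizeB rs).toNat : ℕ) : Int) := (Int.toNat_of_nonneg hT).symm
  set b := (sizeB rs).toNat with hbdef
  show decodeB (r :: rs) ((q * b + m : ℕ) : Int) = _
  unfold decodeB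
  rw [hb, PySem.Int.floordiv_natCast, PySem.Int.mod_natCast]
  have hdiv : (q * b + m) / b = q := by
    rw [Nat.add_comm, Nat.add_mul_div_right _ _ (by omega : 0 < b), Nat.div_eq_of_lt hm]
    omega
  have hmod : (q * b + m) % b = m := by
    rw [Nat.add_comm, Nat.add_mul_mod_self_right, Nat.mod_eq_of_lt hm]
  rw [hdiv, hmod]
  cases rs <;> rfl

lemma decode_enum (rs : List Int) (h : ∀ r ∈ rs, 0 ≤ r ∧ r ≤ 5) :
    (List.range (sizeB rs).toNat).map (fun n : ℕ => decodeB rs ((n : ℕ) : Int)) =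
    pyProductA (rs.map (fun r => List.take r.toNat ['A', 'B', 'C', 'D', 'E'])) := by
  induction rs with
  | nil => decide
  | cons r rs ih =>
    have hr := h r (by simp)
    have hrs : ∀ x ∈ rs, 0 ≤ x ∧ x ≤ 5 := fun x hx => h x (by simp [hx])
    have hT : 0 ≤ sizeB rs := sizeB_nonneg rs (fun x hx => (hrs x hx).1)
    have hsz : (sizeB (r :: rs)).toNat = r.toNat * (sizeB rs).toNat := by
      rw [sizeB_cons]
      rcases hr with ⟨h1, _⟩
      rw [Int.toNat_mul h1 hT]
    rw [hsz, range_mul_flatMap]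
    simp only [List.map_cons, pyProductA]
    rw [take_letters r.toNat (by omega), List.flatMap_map]
    apply List.flatMap_congr
    intro q hq
    rw [← ih hrs, List.map_map]
    apply List.map_congr_left
    intro m hm
    simp only [Function.comp_def]
    exact decode_step r rs hT q m (List.mem_range.mp hm)

theorem makeSuperSetDeck_spec_aux (dims : List Int) (hpre : Pre_makeSuperSetDeck dims) :
    makeSuperSetDeck dims = makeSuperSetDeck_alt dims := by
  unfold makeSuperSetDeck makeSuperSetDeck_alt stringProductA
  simp only [PySem.List.foldl_append_singleton_eq_map]
  have hfeat : (PySem.List.pyRange 0 (dims.length : Int) 1).map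
      (fun i => (PySem.List.pyRange 0 (PySem.List.pyGetD dims i 0) 1).foldl
        (fun temp j => temp ++ PySem.List.pyGetD [['A'], ['B'], ['C'], ['D'], ['E']] j []) []) =
      (dims.map (fun d => max d 0)).map
        (fun r => List.take r.toNat ['A', 'B', 'C', 'D', 'E']) := by
    have h1 : (PySem.List.pyRange 0 (dims.length : Int) 1).map
        (fun i => PySem.List.pyGetD dims i 0) = dims :=
      PySem.List.map_pyGetD_pyRange_zero dims 0
    calc (PySem.List.pyRange 0 (dims.length : Int) 1).map
          (fun i => (PySem.List.pyRange 0 (PySem.List.pyGetD dims i 0) 1).foldl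
            (fun temp j => temp ++ PySem.List.pyGetD [['A'], ['B'], ['C'], ['D'], ['E']] j []) [])
        = ((PySem.List.pyRange 0 (dims.length : Int) 1).map
            (fun i => PySem.List.pyGetD dims i 0)).map
            (fun d => (PySem.List.pyRange 0 d 1).foldl
              (fun temp j => temp ++ PySem.List.pyGetD [['A'], ['B'], ['C'], ['D'], ['E']] j []) []) := by
          rw [List.map_map]
          simp [Function.comp_def]
      _ = dims.map (fun d => (PySem.List.pyRange 0 d 1).foldl
            (fun temp j => temp ++ PySem.List.pyGetD [['A'], ['B'], ['C'], ['D'], ['E']] j []) []) := by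
          rw [h1]
      _ = dims.map (fun d => List.take (max d 0).toNat ['A', 'B', 'C', 'D', 'E']) := by
          apply List.map_congr_left
          intro d hd
          exact featA_eq d (hpre d hd)
      _ = (dims.map (fun d => max d 0)).map
            (fun r => List.take r.toNat ['A', 'B', 'C', 'D', 'E']) := by
          simp [List.map_map, Function.comp_def]
  rw [hfeat]
  set rs := dims.map (fun d => max d 0) with hrs
  have hbound : ∀ r ∈ rs, 0 ≤ r ∧ r ≤ 5 := by
    intro r hr
    rw [hrs] at hr
    obtain ⟨d, hd, rfl⟩ := List.mem_map.mp hr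
    exact ⟨by omega, by have := hpre d hd; omega⟩
  have hT : 0 ≤ sizeB rs := sizeB_nonneg rs (fun x hx => (hbound x hx).1)
  rw [PySem.List.pyRange_one 0 (sizeB rs)]
  simp only [sub_zero, List.map_map, Function.comp_def, zero_add]
  simp only [List.nil_append]
  rw [← decode_enum rs hbound, List.map_map]
  simp [Function.comp_def]

-- ===== VERDICT (by name: the statement is the Claim_ definition above) =====
theorem makeSuperSetDeck_spec : Claim_equal_makeSuperSetDeck := by
  intro dims _ hpre
  unfold Spec_makeSuperSetDeck
  exact makeSuperSetDeck_spec_aux dims hpre
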